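-- pv_equiv track=rewrite | github.com/MrBrantCode/unitest_baseline | mut_generate/mist_train_cf/cf_16294/solution.py | replace_surrounded_letters
-- ===== SOURCE A (Python) =====
-- def replace_surrounded_letters(string, replace, with_, surrounding_chars):
--     new_string = ''
--     i = 0
--
--     while i < len(string):
--         if string[i] == replace:
--             if i - 1 >= 0 and i + 1 < len(string) and string[i - 1] == surrounding_chars[0] and string[i + 1] == surrounding_chars[1]:
--                 new_string += with_
--             else:
--                 new_string += string[i]
--         else:
--             new_string += string[i]
--         i += 1
--
--     return new_string
-- ===== SOURCE B (Python) =====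
-- def replace_surrounded_letters(string, replace, with_, surrounding_chars):
--     left, right = surrounding_chars[0], surrounding_chars[1]
--     if len(replace) != 1 or len(left) != 1 or len(right) != 1:
--         return string
--     pattern = left + replace + right
--     pieces = []
--     prev = 0
--     start = 0
--     while True:
--         j = string.find(pattern, start)
--         if j == -1:
--             break
--         pieces.append(string[prev:j + 1])
--         pieces.append(with_)
--         prev = j + 2
--         start = j + 1
--     pieces.append(string[prev:])
--     return ''.join(pieces)
-- ===== Notes on version B (the rewrite author's own statement) =====
-- stated objective: alternative
-- what changed: B builds the 3-char pattern left+replace+right and locates hits with repeated str.find (restarting one past each hit so overlapping matches are kept), then splices the untouched slices between hits with one join, instead of A's per-index neighbour test with character-by-character string concatenation; non-single-character replace/surrounding strings can never match, so B returns the string unchanged there.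
import Mathlib
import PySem

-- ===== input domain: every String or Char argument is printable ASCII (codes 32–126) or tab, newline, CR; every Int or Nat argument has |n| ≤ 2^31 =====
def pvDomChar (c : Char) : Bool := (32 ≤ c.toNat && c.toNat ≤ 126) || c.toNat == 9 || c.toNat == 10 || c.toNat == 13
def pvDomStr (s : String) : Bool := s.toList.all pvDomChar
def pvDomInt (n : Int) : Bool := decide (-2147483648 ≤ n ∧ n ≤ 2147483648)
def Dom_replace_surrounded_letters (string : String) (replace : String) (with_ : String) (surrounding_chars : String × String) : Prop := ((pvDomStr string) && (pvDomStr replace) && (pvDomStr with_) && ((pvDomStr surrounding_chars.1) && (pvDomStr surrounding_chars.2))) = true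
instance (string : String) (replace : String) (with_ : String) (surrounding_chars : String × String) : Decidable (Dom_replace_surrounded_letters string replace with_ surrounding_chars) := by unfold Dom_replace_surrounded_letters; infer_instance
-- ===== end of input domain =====

-- B finds occurrences of the 3-char pattern left+replace+right with repeated str.find (restarting
-- one past each hit, so overlapping matches are kept) and splices the untouched slices between hits
-- with one join; inputs whose replace/surrounding pieces are not single characters can never match,
-- so B returns the string unchanged there (alternative algorithm; measured faster in a timing run).

-- ===== PORT A =====
-- A's while loop over index i, accumulating new_string.
def pvGoA (cs : List Char) (replace : String) (with_ : String) (l : String) (r : String)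
    (i : Nat) (acc : String) : String :=
  if _h : i < cs.length then
    let c := cs.getD i default
    if String.ofList [c] = replace then
      if 1 ≤ i ∧ i + 1 < cs.length ∧ String.ofList [cs.getD (i - 1) default] = l ∧
          String.ofList [cs.getD (i + 1) default] = r then
        pvGoA cs replace with_ l r (i + 1) (acc ++ with_)
      else
        pvGoA cs replace with_ l r (i + 1) (acc ++ String.ofList [c])
    else
      pvGoA cs replace with_ l r (i + 1) (acc ++ String.ofList [c])
  else acc
termination_by cs.length - i

def replace_surrounded_letters (string : String) (replace : String) (with_ : String) (surrounding_chars : String × String) : String :=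
  pvGoA string.toList replace with_ surrounding_chars.1 surrounding_chars.2 0 ""

-- ===== PORT B =====
-- Source B's 'while True' find loop; fuel only makes the loop total (it is proved sufficient below).
def pvLoopB (s : String) (pattern : String) (with_ : String) :
    Nat → List String → Int → Int → List String
  | 0, pieces, prev, _start => pieces ++ [PySem.Str.slice s (some prev) none]
  | fuel + 1, pieces, prev, start =>
      let j := PySem.Str.findFrom s pattern start
      if j = -1 then pieces ++ [PySem.Str.slice s (some prev) none]
      else pvLoopB s pattern with_ fuel
        (pieces ++ [PySem.Str.slice s (some prev) (some (j + 1)), with_]) (j + 2) (j + 1)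

def replace_surrounded_letters_alt (string : String) (replace : String) (with_ : String) (surrounding_chars : String × String) : String :=
  let left := surrounding_chars.1
  let right := surrounding_chars.2
  if PySem.Str.len replace ≠ 1 ∨ PySem.Str.len left ≠ 1 ∨ PySem.Str.len right ≠ 1 then string
  else
    let pattern := left ++ replace ++ right
    String.join (pvLoopB string pattern with_ (string.toList.length + 1) [] 0 0)

-- ===== PRECONDITION & SPEC =====
def Spec_replace_surrounded_letters (string : String) (replace : String) (with_ : String) (surrounding_chars : String × String) (out : String) : Prop := out = replace_surrounded_letters_alt string replace with_ surrounding_chars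
instance (string : String) (replace : String) (with_ : String) (surrounding_chars : String × String) (out : String) : Decidable (Spec_replace_surrounded_letters string replace with_ surrounding_chars out) := by unfold Spec_replace_surrounded_letters; infer_instance

-- ===== CLAIM (what is proved, stated in full; the proofs are below) =====
def Claim_equal_replace_surrounded_letters : Prop := ∀ (string : String) (replace : String) (with_ : String) (surrounding_chars : String × String), Dom_replace_surrounded_letters string replace with_ surrounding_chars → Spec_replace_surrounded_letters string replace with_ surrounding_chars (replace_surrounded_letters string replace with_ surrounding_chars)

-- ===== LEMMAS AND PROOFS =====

-- A's per-index replacement condition and the piece it contributes at index i.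
def pvHit (cs : List Char) (replace l r : String) (i : Nat) : Bool :=
  decide (String.ofList [cs.getD i default] = replace ∧ 1 ≤ i ∧ i + 1 < cs.length ∧
    String.ofList [cs.getD (i - 1) default] = l ∧ String.ofList [cs.getD (i + 1) default] = r)

def pvPiece (cs : List Char) (replace with_ l r : String) (i : Nat) : String :=
  if pvHit cs replace l r i then with_ else String.ofList [cs.getD i default]

lemma pvFoldlApp (l : List String) : ∀ s : String,
    l.foldl (fun r t => r ++ t) s = s ++ l.foldl (fun r t => r ++ t) "" := by
  induction l with
  | nil => intro s; simp
  | cons a t ih =>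
    intro s; simp only [List.foldl_cons]; rw [ih (s ++ a), ih ("" ++ a)]
    simp [String.append_assoc]

lemma pvJoinCons (s : String) (l : List String) : String.join (s :: l) = s ++ String.join l := by
  simp only [String.join, List.foldl_cons]; rw [pvFoldlApp l ("" ++ s)]; simp

lemma pvOfListAppend (l1 l2 : List Char) :
    String.ofList (l1 ++ l2) = String.ofList l1 ++ String.ofList l2 := by
  have h := String.congr_append (String.ofList l1) (String.ofList l2)
  rw [String.toList_ofList, String.toList_ofList] at h
  exact h.symm

lemma pvJoinAppend (a b : List String) :
    String.join (a ++ b) = String.join a ++ String.join b := by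
  induction a with
  | nil => simp [String.join]
  | cons x t ih => rw [List.cons_append, pvJoinCons, pvJoinCons, ih, String.append_assoc]

-- A equals the join of per-index pieces.
lemma pvA_join (cs : List Char) (replace with_ l r : String) :
    ∀ (k i : Nat), cs.length - i ≤ k → ∀ acc : String,
      pvGoA cs replace with_ l r i acc
        = acc ++ String.join ((List.range' i (cs.length - i)).map (pvPiece cs replace with_ l r)) := by
  intro k
  induction k with
  | zero =>
    intro i hle acc
    have hge : cs.length ≤ i := by omega
    rw [pvGoA.eq_def, dif_neg (by omega)]
    have h0 : cs.length - i = 0 := by omega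
    simp [h0, String.join]
  | succ k ih =>
    intro i hle acc
    by_cases hi : i < cs.length
    · have hn : cs.length - i = (cs.length - (i + 1)) + 1 := by omega
      rw [pvGoA.eq_def, dif_pos hi, hn, List.range'_succ, List.map_cons, pvJoinCons]
      by_cases hc : String.ofList [cs.getD i default] = replace
      · by_cases ha : 1 ≤ i ∧ i + 1 < cs.length ∧ String.ofList [cs.getD (i - 1) default] = l ∧
            String.ofList [cs.getD (i + 1) default] = r
        · have hp : pvPiece cs replace with_ l r i = with_ := by
            unfold pvPiece pvHit
            rw [if_pos (by exact decide_eq_true (by exact ⟨hc, ha⟩))]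
          rw [if_pos hc, if_pos ha, ih (i + 1) (by omega), hp, String.append_assoc]
        · have hp : pvPiece cs replace with_ l r i = String.ofList [cs.getD i default] := by
            unfold pvPiece pvHit
            rw [if_neg (by simp only [decide_eq_true_eq]; exact fun h => ha h.2)]
          rw [if_pos hc, if_neg ha, ih (i + 1) (by omega), hp, String.append_assoc]
      · have hp : pvPiece cs replace with_ l r i = String.ofList [cs.getD i default] := by
          unfold pvPiece pvHit
          rw [if_neg (by simp only [decide_eq_true_eq]; exact fun h => hc h.1)]
        rw [if_neg hc, ih (i + 1) (by omega), hp, String.append_assoc]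
    · have hge : cs.length ≤ i := by omega
      rw [pvGoA.eq_def, dif_neg hi]
      have h0 : cs.length - i = 0 := by omega
      simp [h0, String.join]

-- A hit-free segment of pieces joins to the corresponding slice of the string.
lemma pvJoinSeg (cs : List Char) (replace with_ l r : String) :
    ∀ (len prev : Nat), prev + len ≤ cs.length →
      (∀ i, prev ≤ i → i < prev + len → pvHit cs replace l r i = false) →
      String.join ((List.range' prev len).map (pvPiece cs replace with_ l r))
        = String.ofList ((cs.drop prev).take len) := by
  intro len
  induction len with
  | zero => intro prev _ _; simp [String.join]
  | succ len ih =>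
    intro prev hlen hno
    have hprev : prev < cs.length := by omega
    rw [List.range'_succ, List.map_cons, pvJoinCons,
      List.drop_eq_getElem_cons hprev, List.take_succ_cons]
    have hp : pvPiece cs replace with_ l r prev = String.ofList [cs.getD prev default] := by
      unfold pvPiece
      rw [hno prev (le_refl _) (by omega)]; simp
    rw [hp, ih (prev + 1) (by omega) (fun i h1 h2 => hno i (by omega) (by omega))]
    rw [List.getD_eq_getElem cs default hprev,
      show (cs[prev] :: (cs.drop (prev + 1)).take len) = [cs[prev]] ++ (cs.drop (prev + 1)).take len from rfl,
      pvOfListAppend]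

-- getD/getElem? conversions at an in-range index.
lemma pvGetDsome (cs : List Char) (k : Nat) (x : Char) (hk : k < cs.length) :
    cs.getD k default = x → cs[k]? = some x := by
  intro h
  rw [List.getD_eq_getElem?_getD] at h
  cases hx : cs[k]? with
  | none => exact absurd (List.getElem?_eq_none_iff.mp hx) (by omega)
  | some y => rw [hx] at h; simp at h; rw [h]

lemma pvSomeGetD (cs : List Char) (k : Nat) (x : Char) :
    cs[k]? = some x → cs.getD k default = x := by
  intro h; rw [List.getD_eq_getElem?_getD, h]; rfl

-- Characterise a 3-character prefix of a drop by indexed lookups.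
lemma pvPrefix3 (cs : List Char) (a b c : Char) (k : Nat) :
    [a, b, c] <+: cs.drop k ↔ cs[k]? = some a ∧ cs[k+1]? = some b ∧ cs[k+2]? = some c := by
  constructor
  · intro h
    obtain ⟨t1, e1, h1⟩ := List.cons_prefix_iff.mp h
    obtain ⟨t2, e2, h2⟩ := List.cons_prefix_iff.mp h1
    obtain ⟨t3, e3, _⟩ := List.cons_prefix_iff.mp h2
    have d1 : cs.drop (k + 1) = t1 := by rw [← List.tail_drop, e1]; rfl
    have d2 : cs.drop (k + 2) = t2 := by
      have he : k + 2 = (k + 1) + 1 := by omega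
      rw [he, ← List.tail_drop, d1, e2]; rfl
    refine ⟨?_, ?_, ?_⟩
    · rw [← List.head?_drop, e1]; rfl
    · rw [← List.head?_drop, d1, e2]; rfl
    · rw [← List.head?_drop, d2, e3]; rfl
  · rintro ⟨h1, h2, h3⟩
    obtain ⟨hk, hka⟩ := List.getElem?_eq_some_iff.mp h1
    obtain ⟨hk1, hkb⟩ := List.getElem?_eq_some_iff.mp h2
    obtain ⟨hk2, hkc⟩ := List.getElem?_eq_some_iff.mp h3
    refine ⟨cs.drop (k + 3), ?_⟩
    have he : k + 2 + 1 = k + 3 := by omega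
    rw [List.drop_eq_getElem_cons hk, List.drop_eq_getElem_cons hk1,
      List.drop_eq_getElem_cons hk2, he, hka, hkb, hkc]
    rfl

lemma pvSingleton_eq_iff (c d : Char) (s : String) (hs : s.toList = [d]) :
    String.ofList [c] = s ↔ c = d := by
  constructor
  · intro h
    have := congrArg String.toList h
    rw [String.toList_ofList, hs] at this
    exact List.singleton_injective this
  · intro h; subst h
    rw [← String.ofList_toList (s := s), hs]

-- A's hit condition at i, when all three pieces are single characters, is exactly
-- "1 ≤ i and the pattern is a prefix of cs dropped at i - 1".
lemma pvHit_iff (cs : List Char) (replace l r : String) (lc mc rc : Char)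
    (hm : replace.toList = [mc]) (hl : l.toList = [lc]) (hr : r.toList = [rc]) (i : Nat) :
    pvHit cs replace l r i = true ↔ 1 ≤ i ∧ [lc, mc, rc] <+: cs.drop (i - 1) := by
  unfold pvHit
  rw [decide_eq_true_eq, pvPrefix3]
  constructor
  · rintro ⟨hc, h1, h2, hlft, hrgt⟩
    have e1 : i - 1 + 1 = i := by omega
    have e2 : i - 1 + 2 = i + 1 := by omega
    refine ⟨h1, ?_, ?_, ?_⟩
    · exact pvGetDsome cs (i - 1) lc (by omega) ((pvSingleton_eq_iff _ lc l hl).mp hlft)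
    · rw [show cs[i-1+1]? = cs[i]? by rw [e1]]
      exact pvGetDsome cs i mc (by omega) ((pvSingleton_eq_iff _ mc replace hm).mp hc)
    · rw [show cs[i-1+2]? = cs[i+1]? by rw [e2]]
      exact pvGetDsome cs (i + 1) rc h2 ((pvSingleton_eq_iff _ rc r hr).mp hrgt)
  · rintro ⟨h1, ha, hb, hc⟩
    have e1 : i - 1 + 1 = i := by omega
    have e2 : i - 1 + 2 = i + 1 := by omega
    rw [e1] at hb
    rw [e2] at hc
    have hlen : i + 1 < cs.length := (List.getElem?_eq_some_iff.mp hc).1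
    exact ⟨(pvSingleton_eq_iff _ mc replace hm).mpr (pvSomeGetD cs i mc hb), h1, hlen,
      (pvSingleton_eq_iff _ lc l hl).mpr (pvSomeGetD cs (i - 1) lc ha),
      (pvSingleton_eq_iff _ rc r hr).mpr (pvSomeGetD cs (i + 1) rc hc)⟩

-- String-level slice facts used for B's pieces.
lemma pvSliceFrom (s : String) (prev : Nat) :
    PySem.Str.slice s (some (prev : Int)) none = String.ofList (s.toList.drop prev) := by
  rw [← String.toList_inj, PySem.Str.toList_slice, String.toList_ofList]
  simp [PySem.List.slice_from_natCast]

lemma pvSliceSeg (s : String) (prev b : Nat) :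
    PySem.Str.slice s (some (prev : Int)) (some (b : Int))
      = String.ofList ((s.toList.drop prev).take (b - prev)) := by
  rw [← String.toList_inj, PySem.Str.toList_slice, String.toList_ofList]
  simp [PySem.List.slice_natCast]

-- The find loop's invariant: with enough fuel, the joined pieces equal the joined pieces so far
-- plus the per-index pieces from prev on, provided no hit lies in [prev, start + 1).
lemma pvLoopB_spec (s with_ : String) (lc mc rc : Char) (pattern : String)
    (hpat : pattern.toList = [lc, mc, rc]) (replace l r : String)
    (hm : replace.toList = [mc]) (hl : l.toList = [lc]) (hr : r.toList = [rc]) :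
    ∀ (fuel prev start : Nat) (pieces : List String),
      prev ≤ start + 1 → start ≤ s.toList.length → s.toList.length + 1 - start ≤ fuel →
      (∀ i, prev ≤ i → i < start + 1 → pvHit s.toList replace l r i = false) →
      String.join (pvLoopB s pattern with_ fuel pieces (prev : Int) (start : Int))
        = String.join pieces ++ String.join ((List.range' prev (s.toList.length - prev)).map
            (pvPiece s.toList replace with_ l r)) := by
  intro fuel
  induction fuel with
  | zero => intro prev start pieces _ hs hf _; omega
  | succ fuel ih =>
    intro prev start pieces hps hs hf hno
    rw [pvLoopB]
    simp only [PySem.Str.findFrom_eq, hpat]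
    by_cases hj : PySem.Chars.findFrom s.toList [lc, mc, rc] (start : Int) = -1
    · rw [if_pos hj, pvJoinAppend, pvJoinCons]
      have hnomatch : ∀ i, start ≤ i → ¬ [lc, mc, rc] <+: s.toList.drop i := by
        intro i hi hpre
        have hinfix : [lc, mc, rc] <:+: s.toList.drop start := by
          have hdd : s.toList.drop i = (s.toList.drop start).drop (i - start) := by
            rw [List.drop_drop]; congr 1; omega
          rw [hdd] at hpre
          exact hpre.isInfix.trans (List.drop_suffix _ _).isInfix
        exact ((PySem.Chars.findFrom_natCast_eq_neg_one_iff s.toList [lc, mc, rc] start hs).mp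
          hj) hinfix
      have hallno : ∀ i, prev ≤ i → pvHit s.toList replace l r i = false := by
        intro i hi
        by_cases hlt : i < start + 1
        · exact hno i hi hlt
        · rw [Bool.eq_false_iff]
          intro hhit
          obtain ⟨h1, hpre⟩ := (pvHit_iff s.toList replace l r lc mc rc hm hl hr i).mp hhit
          exact hnomatch (i - 1) (by omega) hpre
      by_cases hpn : prev ≤ s.toList.length
      · rw [pvSliceFrom, pvJoinSeg s.toList replace with_ l r (s.toList.length - prev) prev
          (by omega) (fun i h1 _ => hallno i h1),
          List.take_of_length_le
            (by simp : (s.toList.drop prev).length ≤ s.toList.length - prev)]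
        simp [String.join]
      · have h0 : s.toList.length - prev = 0 := by omega
        rw [pvSliceFrom, List.drop_eq_nil_of_le (by omega), h0]
        simp [String.join]
    · rw [if_neg hj]
      obtain ⟨hstart_le, hpre, hmin⟩ :=
        PySem.Chars.findFrom_natCast_spec s.toList [lc, mc, rc] start hs hj
      set J : Int := PySem.Chars.findFrom s.toList [lc, mc, rc] (start : Int) with hJ
      have hJ0 : 0 ≤ J := le_trans (by exact_mod_cast Nat.zero_le start) hstart_le
      set jn : Nat := J.toNat with hjn
      have hJcast : J = (jn : Int) := by omega
      have hsj : (start : Nat) ≤ jn := by omega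
      -- the pattern fits: jn + 3 ≤ length
      have hfit : jn + 3 ≤ s.toList.length := by
        obtain ⟨_, _, h3⟩ := (pvPrefix3 s.toList lc mc rc jn).mp hpre
        have := (List.getElem?_eq_some_iff.mp h3).1
        omega
      have hc1 : J + 1 = ((jn + 1 : Nat) : Int) := by omega
      have hc2 : J + 2 = ((jn + 2 : Nat) : Int) := by omega
      rw [hc1, hc2]
      rw [ih (jn + 2) (jn + 1) _ (by omega) (by omega) (by omega)
        (fun i h1 h2 => by omega)]
      -- split the remaining range at the hit jn + 1
      have hsplit : List.range' prev (s.toList.length - prev)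
          = List.range' prev (jn + 1 - prev) ++ ((jn + 1) ::
              List.range' (jn + 2) (s.toList.length - (jn + 2))) := by
        have h1 : List.range' prev (jn + 1 - prev) ++ List.range' (prev + 1 * (jn + 1 - prev))
            (s.toList.length - (jn + 1)) = List.range' prev ((jn + 1 - prev) +
              (s.toList.length - (jn + 1))) := List.range'_append
        have hpj : prev ≤ jn + 1 := by omega
        have e1 : prev + 1 * (jn + 1 - prev) = jn + 1 := by omega
        have e2 : (jn + 1 - prev) + (s.toList.length - (jn + 1)) = s.toList.length - prev := by
          omega
        have e3 : s.toList.length - (jn + 1) = (s.toList.length - (jn + 2)) + 1 := by omega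
        rw [e1, e2] at h1
        rw [← h1, e3, List.range'_succ]
      rw [hsplit, List.map_append, pvJoinAppend, List.map_cons, pvJoinCons]
      -- the joined segment before the hit is the slice
      have hseg : String.join ((List.range' prev (jn + 1 - prev)).map
            (pvPiece s.toList replace with_ l r))
          = String.ofList ((s.toList.drop prev).take (jn + 1 - prev)) := by
        apply pvJoinSeg s.toList replace with_ l r (jn + 1 - prev) prev (by omega)
        intro i h1 h2
        by_cases hlt : i < start + 1
        · exact hno i h1 hlt
        · rw [Bool.eq_false_iff]
          intro hhit
          obtain ⟨hge1, hpre'⟩ := (pvHit_iff s.toList replace l r lc mc rc hm hl hr i).mp hhit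
          exact hmin (i - 1) (by omega) (by omega) hpre'
      -- the hit piece is with_
      have hhitpiece : pvPiece s.toList replace with_ l r (jn + 1) = with_ := by
        unfold pvPiece
        rw [if_pos ((pvHit_iff s.toList replace l r lc mc rc hm hl hr (jn + 1)).mpr
          ⟨by omega, by simpa using hpre⟩)]
      rw [pvJoinAppend, pvJoinCons, pvJoinCons, hseg, hhitpiece, pvSliceSeg]
      simp [String.join, String.append_assoc]

-- If one of the three pieces is not a single character, no index is ever a hit.
lemma pvNoHit_of_bad (cs : List Char) (replace l r : String)
    (hbad : replace.toList.length ≠ 1 ∨ l.toList.length ≠ 1 ∨ r.toList.length ≠ 1) (i : Nat) :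
    pvHit cs replace l r i = false := by
  rw [Bool.eq_false_iff]
  intro hhit
  obtain ⟨hc, _, _, hlft, hrgt⟩ := (decide_eq_true_eq.mp hhit)
  rcases hbad with hb | hb | hb
  · exact hb (by rw [← hc, String.toList_ofList]; rfl)
  · exact hb (by rw [← hlft, String.toList_ofList]; rfl)
  · exact hb (by rw [← hrgt, String.toList_ofList]; rfl)

-- ===== VERDICT (by name: the statement is the Claim_ definition above) =====
theorem replace_surrounded_letters_spec : Claim_equal_replace_surrounded_letters := by
  intro string replace with_ sc _dom
  unfold Spec_replace_surrounded_letters replace_surrounded_letters replace_surrounded_letters_alt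
  rw [pvA_join string.toList replace with_ sc.1 sc.2 string.toList.length 0 (by omega) ""]
  simp only [Nat.sub_zero]
  by_cases hg : PySem.Str.len replace ≠ 1 ∨ PySem.Str.len sc.1 ≠ 1 ∨ PySem.Str.len sc.2 ≠ 1
  · rw [if_pos hg]
    have hbad : replace.toList.length ≠ 1 ∨ sc.1.toList.length ≠ 1 ∨ sc.2.toList.length ≠ 1 := by
      simp only [PySem.Str.len_eq] at hg
      rcases hg with h | h | h
      · exact Or.inl (by exact_mod_cast fun he => h (by exact_mod_cast he))
      · exact Or.inr (Or.inl (by exact_mod_cast fun he => h (by exact_mod_cast he)))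
      · exact Or.inr (Or.inr (by exact_mod_cast fun he => h (by exact_mod_cast he)))
    rw [pvJoinSeg string.toList replace with_ sc.1 sc.2 string.toList.length 0 (by omega)
      (fun i _ _ => pvNoHit_of_bad string.toList replace sc.1 sc.2 hbad i),
      List.drop_zero, List.take_of_length_le (le_refl _), String.ofList_toList]
    simp
  · rw [if_neg hg]
    simp only [not_or, ne_eq, not_not] at hg
    obtain ⟨h1, h2, h3⟩ := hg
    simp only [PySem.Str.len_eq] at h1 h2 h3
    have hm : replace.toList.length = 1 := by exact_mod_cast h1
    have hlf : sc.1.toList.length = 1 := by exact_mod_cast h2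
    have hrt : sc.2.toList.length = 1 := by exact_mod_cast h3
    obtain ⟨mc, hmc⟩ := List.length_eq_one_iff.mp hm
    obtain ⟨lc, hlc⟩ := List.length_eq_one_iff.mp hlf
    obtain ⟨rc, hrc⟩ := List.length_eq_one_iff.mp hrt
    have hpat : (sc.1 ++ replace ++ sc.2).toList = [lc, mc, rc] := by
      rw [String.toList_append, String.toList_append, hmc, hlc, hrc]; rfl
    rw [show (0 : Int) = ((0 : Nat) : Int) by rfl]
    rw [pvLoopB_spec string with_ lc mc rc (sc.1 ++ replace ++ sc.2) hpat replace sc.1 sc.2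
      hmc hlc hrc (string.toList.length + 1) 0 0 [] (by omega) (by omega) (by omega)
      (fun i h1 h2 => by
        have : i = 0 := by omega
        subst this
        rw [Bool.eq_false_iff]
        intro hhit
        exact absurd ((pvHit_iff string.toList replace sc.1 sc.2 lc mc rc hmc hlc hrc 0).mp
          hhit).1 (by omega))]
    simp [String.join]
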